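-- pv_equiv track=rewrite | github.com/gio-om/corrective-ability | main.py | bin_sum
-- ===== SOURCE A (Python) =====
-- def bin_sum(signal, error):
--     res = ''
--     for i in range(len(signal)):
--         if signal[i] == error[i]:
--             if len(res) > 0:
--                 res = res + '0'
--         else:
--             res = res + '1'
--     return(res)
-- ===== SOURCE B (Python) =====
-- def bin_sum(sig, err):
--     mism = [i for i in range(len(sig)) if sig[i] != err[i]]
--     if not mism:
--         return ''
--     j = mism[0]
--     buf = bytearray(b'0' * (len(sig) - j))
--     for m in mism:
--         buf[m - j] = ord('1')
--     return buf.decode()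
-- ===== Notes on version B (the rewrite author's own statement) =====
-- stated objective: alternative
-- what changed: B collects the mismatch positions, and if any exist allocates a zero-filled byte buffer of length len(signal)-first_mismatch and writes '1' bytes at the shifted mismatch offsets, instead of A's per-character stateful accumulation with the len(res)>0 guard.
import Mathlib
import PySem

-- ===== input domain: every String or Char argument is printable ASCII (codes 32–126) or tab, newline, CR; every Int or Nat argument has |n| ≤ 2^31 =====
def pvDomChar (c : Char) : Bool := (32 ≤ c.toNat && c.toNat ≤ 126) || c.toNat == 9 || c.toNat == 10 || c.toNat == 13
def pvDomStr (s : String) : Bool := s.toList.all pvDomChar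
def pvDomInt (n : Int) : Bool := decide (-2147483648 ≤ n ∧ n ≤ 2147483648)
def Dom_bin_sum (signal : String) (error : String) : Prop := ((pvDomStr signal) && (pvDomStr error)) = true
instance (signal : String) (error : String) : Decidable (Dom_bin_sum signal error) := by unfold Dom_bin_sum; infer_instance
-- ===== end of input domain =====

-- B collects mismatch positions and writes '1's into a pre-zeroed buffer instead of A's stateful per-character accumulation; objective: alternative.


-- ===== PORT A =====
-- A: loop over indices, append '1' on mismatch, '0' on match only once res is nonempty.
-- getD with a dummy default is exact inside Pre_ (there error[i] is in range).
def bin_sum (signal : String) (error : String) : String :=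
  let s := signal.toList
  let e := error.toList
  String.mk ((List.range s.length).foldl (fun res i =>
    if s.getD i ' ' == e.getD i ' ' then
      (if res.length > 0 then res ++ ['0'] else res)
    else res ++ ['1']) [])

-- ===== PORT B =====
-- B: list the mismatch positions; if none, return ""; else write '1' at each
-- shifted mismatch offset into a buffer of '0's of length n - first_mismatch.
def bin_sum_alt (signal : String) (error : String) : String :=
  let s := signal.toList
  let e := error.toList
  let mism := (List.range s.length).filter (fun i => !(s.getD i ' ' == e.getD i ' '))
  match mism with
  | [] => ""
  | j :: _ =>
    String.mk (mism.foldl (fun buf m => buf.set (m - j) '1')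
      (List.replicate (s.length - j) '0'))

-- ===== PRECONDITION & SPEC =====
-- Pre_ excludes exactly the inputs where error is shorter than signal: there A (and B) raise IndexError.
def Pre_bin_sum (signal : String) (error : String) : Prop := signal.length ≤ error.length
instance (signal : String) (error : String) : Decidable (Pre_bin_sum signal error) := by unfold Pre_bin_sum; infer_instance
def pvWitness_bin_sum : String × String := ("ab", "aa")

def Spec_bin_sum (signal : String) (error : String) (out : String) : Prop := out = bin_sum_alt signal error
instance (signal : String) (error : String) (out : String) : Decidable (Spec_bin_sum signal error out) := by unfold Spec_bin_sum; infer_instance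

-- ===== CLAIM (what is proved, stated in full; the proofs are below) =====
def Claim_equal_bin_sum : Prop := ∀ (signal : String) (error : String), Dom_bin_sum signal error → Pre_bin_sum signal error → Spec_bin_sum signal error (bin_sum signal error)

-- ===== LEMMAS AND PROOFS =====

-- A's loop body, abstracted over the bit function f (each f i is '0' or '1').
def pvStep (f : Nat → Char) (res : List Char) (i : Nat) : List Char :=
  if f i == '0' then (if res.length > 0 then res ++ ['0'] else res) else res ++ ['1']

theorem pvFold_nonempty (f : Nat → Char) (hf : ∀ i, f i = '0' ∨ f i = '1')
    (l : List Nat) (res : List Char) (h : res ≠ []) :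
    l.foldl (pvStep f) res = res ++ l.map f := by
  induction l generalizing res with
  | nil => simp
  | cons i t ih =>
    have hstep : pvStep f res i = res ++ [f i] := by
      unfold pvStep
      rcases hf i with h0 | h1
      · simp [h0, List.length_pos_iff, h]
      · simp [h1]
    rw [List.foldl_cons, hstep, ih _ (by simp)]; simp

theorem pvFold_eq_dropWhile (f : Nat → Char) (hf : ∀ i, f i = '0' ∨ f i = '1') (l : List Nat) :
    l.foldl (pvStep f) [] = (l.map f).dropWhile (· == '0') := by
  induction l with
  | nil => simp
  | cons i t ih =>
    rw [List.foldl_cons]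
    rcases hf i with h0 | h1
    · have : pvStep f [] i = [] := by simp [pvStep, h0]
      rw [this, ih, List.map_cons, List.dropWhile_cons]
      simp [h0]
    · have : pvStep f [] i = ['1'] := by simp [pvStep, h1]
      rw [this, pvFold_nonempty f hf t ['1'] (by simp), List.map_cons, List.dropWhile_cons]
      simp [h1]

-- dropWhile (== '0') = drop j when the first j entries are '0' and entry j (if any) is not.
theorem pvDropWhile_eq_drop (l : List Char) : ∀ j : Nat,
    (∀ i < j, l[i]? = some '0') → (∀ c, l[j]? = some c → c ≠ '0') →
    l.dropWhile (· == '0') = l.drop j := by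
  induction l with
  | nil => intro j _ _; simp
  | cons c t ih =>
    intro j h1 h2
    cases j with
    | zero =>
      have hc : c ≠ '0' := h2 c (by simp)
      simp [hc]
    | succ j =>
      have hc : c = '0' := by
        have := h1 0 (Nat.succ_pos _); simpa using this
      rw [List.dropWhile_cons]
      simp only [hc]
      rw [if_pos (by simp)]
      rw [List.drop_succ_cons]
      exact ih j (fun i hi => by simpa using h1 (i+1) (by omega))
        (fun d hd => h2 d (by simpa using hd))

-- getElem? after folding 'set (m - j)' over a list of positions.
theorem pvFoldSet_get? (j : Nat) (L : List Nat) (b : List Char) (k : Nat) :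
    (L.foldl (fun buf m => buf.set (m - j) '1') b)[k]? =
      if (∃ m ∈ L, m - j = k) ∧ k < b.length then some '1' else b[k]? := by
  induction L generalizing b with
  | nil => simp
  | cons m t ih =>
    rw [List.foldl_cons, ih, List.getElem?_set]
    by_cases hk : k < b.length
    · by_cases hex : ∃ m' ∈ t, m' - j = k
      · simp [hex, hk]
      · by_cases hmk : m - j = k
        · simp [hex, hk, hmk]
        · simp [hex, hk, hmk]
    · have hnone : b[k]? = none := List.getElem?_eq_none (Nat.le_of_not_lt hk)
      simp only [List.length_set, hk, and_false, if_false, hnone]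
      split
      · split
        · omega
        · rfl
      · rfl

-- the bit at position i and the fact that it is always '0' or '1'
def pvBit (s e : List Char) (i : Nat) : Char :=
  if s.getD i ' ' == e.getD i ' ' then '0' else '1'

theorem pvBit_cases (s e : List Char) (i : Nat) : pvBit s e i = '0' ∨ pvBit s e i = '1' := by
  unfold pvBit; split_ifs <;> simp

theorem pvCore (signal error : String) : bin_sum signal error = bin_sum_alt signal error := by
  unfold bin_sum bin_sum_alt
  dsimp only
  generalize signal.toList = s
  generalize error.toList = e
  have hstep : (fun (res : List Char) (i : Nat) =>
      if s.getD i ' ' == e.getD i ' ' then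
        (if res.length > 0 then res ++ ['0'] else res)
      else res ++ ['1']) = pvStep (pvBit s e) := by
    funext res i
    unfold pvStep pvBit
    split_ifs <;> simp_all
  rw [hstep, pvFold_eq_dropWhile (pvBit s e) (pvBit_cases s e)]
  have hfeq : (fun i => !(s.getD i ' ' == e.getD i ' ')) = (fun i => pvBit s e i == '1') := by
    funext i
    unfold pvBit
    by_cases h : s[i]?.getD ' ' = e[i]?.getD ' ' <;> simp [List.getD, h]
  rw [hfeq]
  generalize hm : (List.range s.length).filter (fun i => pvBit s e i == '1') = mism
  have hmem : ∀ i, i ∈ mism ↔ i < s.length ∧ pvBit s e i = '1' := by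
    intro i
    rw [← hm, List.mem_filter, List.mem_range]
    simp
  have hsorted : List.Pairwise (· < ·) mism := by
    rw [← hm]
    exact List.Pairwise.filter _ (List.pairwise_lt_range)
  have hbits_get : ∀ i, ((List.range s.length).map (pvBit s e))[i]? =
      if i < s.length then some (pvBit s e i) else none := by
    intro i
    by_cases h : i < s.length
    · rw [List.getElem?_map, List.getElem?_range h]; simp [h]
    · rw [List.getElem?_eq_none (by simpa using Nat.le_of_not_lt h)]; simp [h]
  cases mism with
  | nil =>
    have hall : ∀ i < s.length, pvBit s e i = '0' := by
      intro i hi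
      rcases pvBit_cases s e i with h | h
      · exact h
      · exact absurd ((hmem i).2 ⟨hi, h⟩) (by simp)
    rw [pvDropWhile_eq_drop _ s.length
      (fun i hi => by rw [hbits_get]; simp [hi, hall i hi])
      (fun c hc => by rw [hbits_get] at hc; simp at hc)]
    have : List.drop s.length ((List.range s.length).map (pvBit s e)) = [] := by simp
    rw [this]
    rfl
  | cons j t =>
    have hj : j ∈ j :: t := by simp
    have hjn : j < s.length := ((hmem j).1 hj).1
    have hjf : pvBit s e j = '1' := ((hmem j).1 hj).2
    have hge : ∀ m ∈ j :: t, j ≤ m := by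
      intro m hmm
      rcases List.mem_cons.1 hmm with rfl | h
      · exact Nat.le_refl _
      · exact Nat.le_of_lt ((List.pairwise_cons.1 hsorted).1 m h)
    have hlow : ∀ i < j, pvBit s e i = '0' := by
      intro i hi
      rcases pvBit_cases s e i with h | h
      · exact h
      · have hin : i ∈ j :: t := (hmem i).2 ⟨Nat.lt_trans hi hjn, h⟩
        exact absurd (hge i hin) (by omega)
    rw [pvDropWhile_eq_drop _ j
      (fun i hi => by rw [hbits_get]; simp [Nat.lt_trans hi hjn, hlow i hi])
      (fun c hc => by rw [hbits_get] at hc; simp [hjn] at hc; simp [← hc, hjf])]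
    show String.mk _ = String.mk _
    congr 1
    apply List.ext_getElem?
    intro k
    rw [pvFoldSet_get? j (j :: t) (List.replicate (s.length - j) '0') k]
    rw [List.getElem?_drop, hbits_get]
    by_cases hk : k < s.length - j
    · have hjk : j + k < s.length := by omega
      by_cases hex : ∃ m ∈ j :: t, m - j = k
      · have h1 : pvBit s e (j + k) = '1' := by
          rcases hex with ⟨m, hmm, hmk⟩
          have := hge m hmm
          have hmeq : m = j + k := by omega
          exact hmeq ▸ ((hmem m).1 hmm).2
        rw [if_pos hjk, h1,
          if_pos (⟨hex, by simpa using hk⟩ :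
            (∃ m ∈ j :: t, m - j = k) ∧ k < (List.replicate (s.length - j) '0').length)]
      · have hnm : pvBit s e (j + k) = '0' := by
          rcases pvBit_cases s e (j + k) with h | h
          · exact h
          · exact absurd ⟨j + k, (hmem _).2 ⟨hjk, h⟩, by omega⟩ hex
        rw [if_pos hjk, hnm, if_neg (fun hc => hex hc.1),
          List.getElem?_replicate, if_pos hk]
    · have hjk : ¬ j + k < s.length := by omega
      simp [hk, hjk]

-- ===== VERDICT =====
theorem bin_sum_spec : Claim_equal_bin_sum := by
  intro signal error _ _
  exact pvCore signal error
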